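-- pv_equiv track=rewrite | github.com/mikhail-medvedev90/py-utils-collection | task3/solution_3.py | crop_and_merge
-- ===== SOURCE A (Python) =====
-- def merge_intervals(intervals: list[tuple[int, int]]) -> list[tuple[int, int]]:
--     """Объединяет пересекающиеся или смежные интервалы."""
--     if not intervals:
--         return []
--     sorted_intervals = sorted(intervals, key=lambda x: x[0])
--     merged = [list(sorted_intervals[0])]
--     for current in sorted_intervals[1:]:
--         last = merged[-1]
--         if current[0] <= last[1]:
--             merged[-1][1] = max(last[1], current[1])
--         else:
--             merged.append(list(current))
--     return [(i[0], i[1]) for i in merged]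
--
-- def crop_and_merge(intervals_list: list[int], lesson_start: int, lesson_end: int) -> list[tuple[int, int]]:
--     """Обрезает интервалы по уроку и объединяет их."""
--     pairs = list(zip(intervals_list[::2], intervals_list[1::2]))
--     cropped = []
--     for s, e in pairs:
--         new_s = max(s, lesson_start)
--         new_e = min(e, lesson_end)
--         if new_s < new_e:
--             cropped.append((new_s, new_e))
--     return merge_intervals(cropped)
-- ===== SOURCE B (Python) =====
-- def _insert(s, e, merged):
--     """Insert [s, e) into a sorted list of disjoint, non-touching intervals,
--     merging it with every interval it overlaps or touches; returns the new list."""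
--     out = []
--     i = 0
--     n = len(merged)
--     while i < n:
--         a, b = merged[i]
--         if b < s:
--             out.append((a, b))
--             i += 1
--             continue
--         if e < a:
--             break
--         s = min(s, a)
--         e = max(e, b)
--         i += 1
--     out.append((s, e))
--     out.extend(merged[i:])
--     return out
--
--
-- def crop_and_merge(intervals_list, lesson_start, lesson_end):
--     merged = []
--     i = 0
--     while i + 1 < len(intervals_list):
--         s = max(intervals_list[i], lesson_start)
--         e = min(intervals_list[i + 1], lesson_end)
--         i += 2
--         if s < e:
--             merged = _insert(s, e, merged)
--     return merged
-- ===== Notes on version B (the rewrite author's own statement) =====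
-- stated objective: alternative
-- what changed: A crops the zipped stride-2 slices and then merges by sorting the cropped intervals and scanning with last-element mutation; B never sorts: it consumes the flat list two elements at a time and inserts each cropped interval into an always-merged sorted disjoint list, merging overlapping/touching neighbours on the way.
import Mathlib
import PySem

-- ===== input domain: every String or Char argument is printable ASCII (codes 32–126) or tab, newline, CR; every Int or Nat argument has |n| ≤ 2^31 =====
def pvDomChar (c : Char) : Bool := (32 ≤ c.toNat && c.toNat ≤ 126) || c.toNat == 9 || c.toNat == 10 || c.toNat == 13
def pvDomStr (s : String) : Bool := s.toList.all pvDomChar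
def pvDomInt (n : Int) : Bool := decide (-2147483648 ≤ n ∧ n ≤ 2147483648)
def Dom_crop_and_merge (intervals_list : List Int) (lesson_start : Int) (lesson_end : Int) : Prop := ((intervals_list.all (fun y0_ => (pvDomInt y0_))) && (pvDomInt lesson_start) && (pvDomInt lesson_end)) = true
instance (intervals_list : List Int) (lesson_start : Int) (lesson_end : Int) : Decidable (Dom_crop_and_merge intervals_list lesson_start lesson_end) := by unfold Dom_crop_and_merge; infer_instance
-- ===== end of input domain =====

-- B replaces A's sort-then-scan merging by sort-free incremental insertion of each
-- cropped interval into an always-merged list (objective: alternative algorithm).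

-- ===== PORT A =====
-- merge_intervals: sort by start, then scan, mutating the last merged interval.
-- (Python's inner 2-element lists are modelled as pairs; the final
--  [(i[0], i[1]) for i in merged] is the map at the end.)
def merge_intervals (intervals : List (Int × Int)) : List (Int × Int) :=
  if intervals = [] then []
  else
    let sorted_intervals := PySem.List.sorted intervals (fun x => x.1)
    let merged := (sorted_intervals.drop 1).foldl
      (fun merged current =>
        let last := merged.getLastD (0, 0)   -- merged is never empty; default never read
        if current.1 ≤ last.2 then
          merged.dropLast ++ [(last.1, max last.2 current.2)]
        else
          merged ++ [current])
      [sorted_intervals.headD (0, 0)]        -- sorted_intervals is nonempty here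
    merged.map (fun i => (i.1, i.2))

def crop_and_merge (intervals_list : List Int) (lesson_start : Int) (lesson_end : Int) : List (Int × Int) :=
  let pairs := List.zip ((PySem.List.slice? intervals_list none none 2).getD [])
                        ((PySem.List.slice? intervals_list (some 1) none 2).getD [])
  let cropped := pairs.foldl
    (fun cropped se =>
      let new_s := max se.1 lesson_start
      let new_e := min se.2 lesson_end
      if new_s < new_e then cropped ++ [(new_s, new_e)] else cropped)
    []
  merge_intervals cropped

-- ===== PORT B =====
-- _insert: insert [s, e) into a sorted, disjoint, non-touching list, merging overlaps.
def insertIv (s e : Int) : List (Int × Int) → List (Int × Int)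
  | [] => [(s, e)]
  | (a, b) :: rest =>
    if b < s then (a, b) :: insertIv s e rest
    else if e < a then (s, e) :: (a, b) :: rest
    else insertIv (min s a) (max e b) rest

-- the while-loop of B: consume the flat list two elements at a time
def altGo (lesson_start lesson_end : Int) : List Int → List (Int × Int) → List (Int × Int)
  | x :: y :: rest, merged =>
    let s := max x lesson_start
    let e := min y lesson_end
    if s < e then altGo lesson_start lesson_end rest (insertIv s e merged)
    else altGo lesson_start lesson_end rest merged
  | _, merged => merged

def crop_and_merge_alt (intervals_list : List Int) (lesson_start : Int) (lesson_end : Int) : List (Int × Int) :=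
  altGo lesson_start lesson_end intervals_list []

-- ===== PRECONDITION & SPEC =====
def Spec_crop_and_merge (intervals_list : List Int) (lesson_start : Int) (lesson_end : Int) (out : List (Int × Int)) : Prop := out = crop_and_merge_alt intervals_list lesson_start lesson_end
instance (intervals_list : List Int) (lesson_start : Int) (lesson_end : Int) (out : List (Int × Int)) : Decidable (Spec_crop_and_merge intervals_list lesson_start lesson_end out) := by unfold Spec_crop_and_merge; infer_instance

-- ===== CLAIM (what is proved, stated in full; the proofs are below) =====
def Claim_equal_crop_and_merge : Prop := ∀ (intervals_list : List Int) (lesson_start : Int) (lesson_end : Int), Dom_crop_and_merge intervals_list lesson_start lesson_end → Spec_crop_and_merge intervals_list lesson_start lesson_end (crop_and_merge intervals_list lesson_start lesson_end)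

-- ===== LEMMAS AND PROOFS =====

-- x lies in some interval of L (half-open intervals)
def covered (L : List (Int × Int)) (x : Int) : Prop := ∃ p ∈ L, p.1 ≤ x ∧ x < p.2

-- canonical merged form: proper intervals, sorted, pairwise disjoint and non-touching
def Can (L : List (Int × Int)) : Prop :=
  (∀ p ∈ L, p.1 < p.2) ∧ L.Pairwise (fun p q => p.2 < q.1)

-- elements of the flat list, paired two at a time
def pairUp : List Int → List (Int × Int)
  | x :: y :: rest => (x, y) :: pairUp rest
  | _ => []

-- the two stride-2 slices of A, as plain recursions
def evens : List Int → List Int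
  | x :: _ :: rest => x :: evens rest
  | [x] => [x]
  | [] => []

def odds : List Int → List Int
  | _ :: y :: rest => y :: odds rest
  | [_] => []
  | [] => []

-- A's scan over the sorted tail, rewritten with the running interval explicit
def goA (cur : Int × Int) : List (Int × Int) → List (Int × Int)
  | [] => [cur]
  | c :: rest => if c.1 ≤ cur.2 then goA (cur.1, max cur.2 c.2) rest else cur :: goA c rest

theorem slice2_evens (xs : List Int) :
    (PySem.List.slice? xs none none 2).getD [] = evens xs := by
  induction xs using evens.induct with
  | case3 => simp [PySem.List.slice?, PySem.List.sliceIndices, evens]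
  | case2 x => simp [PySem.List.slice?, PySem.List.sliceIndices, evens]
  | case1 x y r ih =>
    simp only [PySem.List.slice?, PySem.List.sliceIndices, evens] at ih ⊢
    norm_num at ih ⊢
    have hc1 : ((((r.length:Int) + 1 + 1 + 2 - 1) / 2)).toNat = (r.length + 1) / 2 + 1 := by
      omega
    have hc2 : (if 0 < r.length then ((((r.length:Int)) + 2 - 1) / 2).toNat else 0)
        = (r.length + 1) / 2 := by
      split_ifs <;> omega
    rw [hc2] at ih
    rw [show (if (0:Int) ≤ (r.length:Int) + 1 then ((((r.length:Int)) + 1 + 1 + 2 - 1) / 2).toNat else 0) = (r.length + 1) / 2 + 1 by rw [if_pos (by positivity)]; exact hc1]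
    rw [List.range_succ_eq_map, List.filterMap_cons]
    have h0 : (2 * ((0:Nat):Int)).toNat = 0 := by omega
    simp only [h0, List.getElem?_cons_zero, List.filterMap_map]
    refine congrArg (List.cons x) (Eq.trans (List.filterMap_congr (g := fun (k : Nat) => r[(2 * (k:Int)).toNat]?) ?_) ih)
    intro k _
    have h2 : (2 * ((k.succ : Nat) : Int)).toNat = (2 * (k:Int)).toNat + 1 + 1 := by
      push_cast; omega
    simp only [Function.comp_apply, h2, List.getElem?_cons_succ]

theorem slice2_odds (xs : List Int) :
    (PySem.List.slice? xs (some 1) none 2).getD [] = odds xs := by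
  induction xs using odds.induct with
  | case3 => simp [PySem.List.slice?, PySem.List.sliceIndices, odds]
  | case2 x => simp [PySem.List.slice?, PySem.List.sliceIndices, odds]
  | case1 x y r ih =>
    simp only [PySem.List.slice?, PySem.List.sliceIndices, odds] at ih ⊢
    norm_num at ih ⊢
    have hc1 : (((r.length:Int) + 1 + 1 - min 1 ((r.length:Int) + 1 + 1) + 2 - 1) / 2).toNat = r.length / 2 + 1 := by omega
    have hc2 : (if 1 < r.length then (((r.length:Int) - min 1 (r.length:Int) + 2 - 1) / 2).toNat else 0) = r.length / 2 := by split_ifs <;> omega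
    rw [hc1, List.range_succ_eq_map, List.filterMap_cons]
    rw [hc2] at ih
    have h0 : (min 1 ((r.length:Int) + 1 + 1) + 2 * ((0:Nat):Int)).toNat = 1 := by omega
    simp only [h0, List.getElem?_cons_succ, List.getElem?_cons_zero, List.filterMap_map]
    refine congrArg (List.cons y) (Eq.trans (List.filterMap_congr (g := fun (k : Nat) => r[(min 1 (r.length:Int) + 2 * (k:Int)).toNat]?) ?_) ih)
    intro k hk
    simp only [List.mem_range] at hk
    have hL : 2 ≤ r.length := by omega
    have h2 : (min 1 ((r.length:Int) + 1 + 1) + 2 * ((k.succ : Nat) : Int)).toNat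
        = (min 1 (r.length:Int) + 2 * (k:Int)).toNat + 1 + 1 := by push_cast; omega
    simp only [Function.comp_apply, h2, List.getElem?_cons_succ]

theorem zip_evens_odds (xs : List Int) : List.zip (evens xs) (odds xs) = pairUp xs := by
  induction xs using evens.induct with
  | case1 x y r ih => simp only [evens, odds, pairUp, List.zip_cons_cons, ih]
  | case2 x => simp [evens, odds, pairUp]
  | case3 => simp [evens, odds, pairUp]

theorem covered_cons (p : Int × Int) (L : List (Int × Int)) (x : Int) :
    covered (p :: L) x ↔ (p.1 ≤ x ∧ x < p.2) ∨ covered L x := by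
  simp [covered]

theorem covered_perm {L1 L2 : List (Int × Int)} (h : L1.Perm L2) (x : Int) :
    covered L1 x ↔ covered L2 x := by
  simp [covered, h.mem_iff]

-- lower bound on starts is preserved by insertIv
theorem ins_lb (s e m : Int) (L : List (Int × Int)) (hms : m ≤ s)
    (hL : ∀ p ∈ L, m ≤ p.1) : ∀ p ∈ insertIv s e L, m ≤ p.1 := by
  induction L generalizing s e with
  | nil => simpa [insertIv] using hms
  | cons hd rest ih =>
    obtain ⟨a, b⟩ := hd
    simp only [insertIv]
    split_ifs with h1 h2
    · intro p hp
      rcases List.mem_cons.mp hp with h | h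
      · subst h; exact hL (a, b) (by simp)
      · exact ih s e hms (fun q hq => hL q (by simp [hq])) p h
    · intro p hp
      rcases List.mem_cons.mp hp with h | h
      · subst h; exact hms
      · exact hL p (by simpa using h)
    · exact ih (min s a) (max e b)
        (le_min hms (hL (a, b) (by simp)))
        (fun q hq => hL q (by simp [hq]))

-- insertIv adds exactly [s, e) to the covered set
theorem ins_cov (s e : Int) (L : List (Int × Int)) (hse : s < e)
    (hL : ∀ p ∈ L, p.1 < p.2) (x : Int) :
    covered (insertIv s e L) x ↔ (s ≤ x ∧ x < e) ∨ covered L x := by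
  induction L generalizing s e with
  | nil => simp [insertIv, covered]
  | cons hd rest ih =>
    obtain ⟨a, b⟩ := hd
    have hab : a < b := hL (a, b) (by simp)
    have hrest : ∀ p ∈ rest, p.1 < p.2 := fun q hq => hL q (by simp [hq])
    simp only [insertIv]
    split_ifs with h1 h2
    · rw [covered_cons, ih s e hse hrest, covered_cons]
      tauto
    · simp only [covered_cons]
    · rw [ih (min s a) (max e b) (by omega) hrest, covered_cons]
      dsimp only
      constructor
      · rintro (h | h)
        · omega
        · tauto
      · rintro (h | h | h)
        · left; omega
        · left; omega
        · tauto

-- insertIv preserves canonicity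
theorem ins_can (s e : Int) (L : List (Int × Int)) (hse : s < e) (hC : Can L) :
    Can (insertIv s e L) := by
  induction L generalizing s e with
  | nil => exact ⟨by simpa [insertIv] using hse, by simp [insertIv]⟩
  | cons hd rest ih =>
    obtain ⟨a, b⟩ := hd
    obtain ⟨hprop, hpw⟩ := hC
    have hab : a < b := hprop (a, b) (by simp)
    rw [List.pairwise_cons] at hpw
    obtain ⟨hhd, hpwrest⟩ := hpw
    have hCrest : Can rest := ⟨fun q hq => hprop q (by simp [hq]), hpwrest⟩
    simp only [insertIv]
    split_ifs with h1 h2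
    · obtain ⟨ihprop, ihpw⟩ := ih s e hse hCrest
      refine ⟨?_, ?_⟩
      · intro p hp
        rcases List.mem_cons.mp hp with h | h
        · subst h; exact hab
        · exact ihprop p h
      · rw [List.pairwise_cons]
        refine ⟨?_, ihpw⟩
        intro q hq
        have := ins_lb s e (b + 1) rest (by omega) (fun q hq => by
          have := hhd q hq; omega) q hq
        omega
    · refine ⟨?_, ?_⟩
      · intro p hp
        rcases List.mem_cons.mp hp with h | h
        · subst h; exact hse
        · exact hprop p (by simpa using h)
      · rw [List.pairwise_cons]
        refine ⟨?_, by rw [List.pairwise_cons]; exact ⟨hhd, hpwrest⟩⟩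
        intro q hq
        rcases List.mem_cons.mp hq with h | h
        · subst h; exact h2
        · have hbq := hhd q h
          show e < q.1
          omega
    · exact ih (min s a) (max e b) (by omega) hCrest

-- B's fold of insertIv: canonical output covering exactly the input intervals
theorem foldB (Cl : List (Int × Int)) : ∀ (m : List (Int × Int)),
    (∀ p ∈ Cl, p.1 < p.2) → Can m →
    Can (Cl.foldl (fun m q => insertIv q.1 q.2 m) m) ∧
    (∀ x, covered (Cl.foldl (fun m q => insertIv q.1 q.2 m) m) x ↔ covered Cl x ∨ covered m x) := by
  induction Cl with
  | nil => intro m _ hm; exact ⟨hm, fun x => by simp [covered]⟩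
  | cons q rest ih =>
    intro m hprop hm
    have hq : q.1 < q.2 := hprop q (by simp)
    have hrest : ∀ p ∈ rest, p.1 < p.2 := fun p hp => hprop p (by simp [hp])
    have hm' : Can (insertIv q.1 q.2 m) := ins_can q.1 q.2 m hq hm
    obtain ⟨hcan, hcov⟩ := ih (insertIv q.1 q.2 m) hrest hm'
    refine ⟨hcan, fun x => ?_⟩
    rw [List.foldl_cons, hcov x, ins_cov q.1 q.2 m hq hm.1 x, covered_cons]
    tauto

-- A's merged-list fold is goA on the running last interval
theorem foldA (t : List (Int × Int)) : ∀ (m : List (Int × Int)) (cur : Int × Int),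
    t.foldl (fun merged current =>
        let last := merged.getLastD (0, 0)
        if current.1 ≤ last.2 then
          merged.dropLast ++ [(last.1, max last.2 current.2)]
        else
          merged ++ [current]) (m ++ [cur]) = m ++ goA cur t := by
  induction t with
  | nil => simp [goA]
  | cons c rest ih =>
    intro m cur
    simp only [List.foldl_cons, List.getLastD_concat, List.dropLast_concat, goA]
    split_ifs with h
    · exact ih m (cur.1, max cur.2 c.2)
    · rw [show m ++ [cur] ++ [c] = (m ++ [cur]) ++ [c] by simp, ih (m ++ [cur]) c]
      simp

-- goA: canonical output covering the running interval and the rest, starts bounded below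
theorem goA_props (t : List (Int × Int)) : ∀ (cur : Int × Int), cur.1 < cur.2 →
    (∀ p ∈ t, p.1 < p.2) → t.Pairwise (fun p q => p.1 ≤ q.1) → (∀ p ∈ t, cur.1 ≤ p.1) →
    (∀ q ∈ goA cur t, cur.1 ≤ q.1) ∧ Can (goA cur t) ∧
    (∀ x, covered (goA cur t) x ↔ (cur.1 ≤ x ∧ x < cur.2) ∨ covered t x) := by
  induction t with
  | nil =>
    intro cur hcur _ _ _
    refine ⟨by simp [goA], ⟨by simpa [goA] using hcur, by simp [goA]⟩, fun x => ?_⟩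
    simp [goA, covered]
  | cons c rest ih =>
    intro cur hcur hprop hpw hge
    have hc : c.1 < c.2 := hprop c (by simp)
    have hrest : ∀ p ∈ rest, p.1 < p.2 := fun p hp => hprop p (by simp [hp])
    rw [List.pairwise_cons] at hpw
    obtain ⟨hcr, hpwrest⟩ := hpw
    have hgec : cur.1 ≤ c.1 := hge c (by simp)
    simp only [goA]
    split_ifs with h
    · -- c merges into the running interval
      obtain ⟨ihlb, ihcan, ihcov⟩ := ih (cur.1, max cur.2 c.2) (by simp; omega) hrest hpwrest
        (fun p hp => le_trans hgec (hcr p hp))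
      refine ⟨fun q hq => ihlb q hq, ihcan, fun x => ?_⟩
      rw [ihcov x, covered_cons]
      dsimp only
      have hsplit : (cur.1 ≤ x ∧ x < max cur.2 c.2) ↔
          (cur.1 ≤ x ∧ x < cur.2) ∨ (c.1 ≤ x ∧ x < c.2) := by omega
      rw [hsplit]
      tauto
    · -- the running interval is closed, c starts a new one
      obtain ⟨ihlb, ihcan, ihcov⟩ := ih c hc hrest hpwrest hcr
      refine ⟨?_, ?_, fun x => ?_⟩
      · intro q hq
        rcases List.mem_cons.mp hq with hq' | hq'
        · subst hq'; exact le_refl _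
        · exact le_trans hgec (ihlb q hq')
      · refine ⟨?_, ?_⟩
        · intro p hp
          rcases List.mem_cons.mp hp with hp' | hp'
          · subst hp'; exact hcur
          · exact ihcan.1 p hp'
        · rw [List.pairwise_cons]
          refine ⟨?_, ihcan.2⟩
          intro q hq
          have := ihlb q hq
          omega
      · rw [covered_cons, ihcov x, covered_cons]

-- canonical lists covering the same points are equal
theorem canonEq (L1 : List (Int × Int)) : ∀ (L2 : List (Int × Int)), Can L1 → Can L2 →
    (∀ x, covered L1 x ↔ covered L2 x) → L1 = L2 := by
  induction L1 with
  | nil =>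
    intro L2 _ hC2 hcov
    cases L2 with
    | nil => rfl
    | cons q t2 =>
      exfalso
      have hq : q.1 < q.2 := hC2.1 q (by simp)
      have : covered (q :: t2) q.1 := ⟨q, by simp, le_refl _, hq⟩
      rw [← hcov q.1] at this
      simp [covered] at this
  | cons p t1 ih =>
    intro L2 hC1 hC2 hcov
    cases L2 with
    | nil =>
      exfalso
      have hp : p.1 < p.2 := hC1.1 p (by simp)
      have : covered (p :: t1) p.1 := ⟨p, by simp, le_refl _, hp⟩
      rw [hcov p.1] at this
      simp [covered] at this
    | cons q t2 =>
      have hp : p.1 < p.2 := hC1.1 p (by simp)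
      have hq : q.1 < q.2 := hC2.1 q (by simp)
      have hpw1 := (List.pairwise_cons.mp hC1.2).1
      have hpw2 := (List.pairwise_cons.mp hC2.2).1
      -- covered points of r::L start at r.1, and r.2 is never covered
      have hstart : ∀ (r : Int × Int) (L : List (Int × Int)), r.1 < r.2 →
          (∀ u ∈ L, r.2 < u.1) → ∀ x, covered (r :: L) x → r.1 ≤ x := by
        intro r L hr hL x hx
        rcases hx with ⟨u, hu, h1, h2⟩
        rcases List.mem_cons.mp hu with h | h
        · subst h; exact h1
        · have := hL u h; omega
      have hnotend : ∀ (r : Int × Int) (L : List (Int × Int)),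
          (∀ u ∈ L, r.2 < u.1) → ¬ covered (r :: L) r.2 := by
        intro r L hL hx
        rcases hx with ⟨u, hu, h1, h2⟩
        rcases List.mem_cons.mp hu with h | h
        · subst h; omega
        · have := hL u h; omega
      have hcv1 : covered (p :: t1) p.1 := ⟨p, by simp, le_refl _, hp⟩
      have hcv2 : covered (q :: t2) q.1 := ⟨q, by simp, le_refl _, hq⟩
      have h11 : q.1 ≤ p.1 := hstart q t2 hq hpw2 p.1 ((hcov p.1).mp hcv1)
      have h12 : p.1 ≤ q.1 := hstart p t1 hp hpw1 q.1 ((hcov q.1).mpr hcv2)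
      have hfst : p.1 = q.1 := le_antisymm h12 h11
      have hsnd : p.2 = q.2 := by
        rcases lt_trichotomy p.2 q.2 with h | h | h
        · exact absurd ((hcov p.2).mpr ⟨q, by simp, by omega, h⟩) (hnotend p t1 hpw1)
        · exact h
        · exact absurd ((hcov q.2).mp ⟨p, by simp, by omega, h⟩) (hnotend q t2 hpw2)
      have hpq : p = q := Prod.ext hfst hsnd
      subst hpq
      have hC1t : Can t1 := ⟨fun u hu => hC1.1 u (by simp [hu]), (List.pairwise_cons.mp hC1.2).2⟩
      have hC2t : Can t2 := ⟨fun u hu => hC2.1 u (by simp [hu]), (List.pairwise_cons.mp hC2.2).2⟩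
      have hgt1 : ∀ x, covered t1 x → p.2 < x := by
        rintro x ⟨u, hu, h1, h2⟩
        have := hpw1 u hu; omega
      have hgt2 : ∀ x, covered t2 x → p.2 < x := by
        rintro x ⟨u, hu, h1, h2⟩
        have := hpw2 u hu; omega
      have hcovt : ∀ x, covered t1 x ↔ covered t2 x := by
        intro x
        constructor
        · intro hx
          have hx' := (hcov x).mp ((covered_cons p t1 x).mpr (Or.inr hx))
          rcases (covered_cons p t2 x).mp hx' with h | h
          · have := hgt1 x hx; omega
          · exact h
        · intro hx
          have hx' := (hcov x).mpr ((covered_cons p t2 x).mpr (Or.inr hx))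
          rcases (covered_cons p t1 x).mp hx' with h | h
          · have := hgt2 x hx; omega
          · exact h
      rw [ih t2 hC1t hC2t hcovt]

-- sort-then-scan equals fold-of-insert, for any list of proper intervals
theorem merge_eq_fold (Cl : List (Int × Int)) (hCl : ∀ p ∈ Cl, p.1 < p.2) :
    merge_intervals Cl = Cl.foldl (fun m q => insertIv q.1 q.2 m) [] := by
  by_cases hnil : Cl = []
  · subst hnil; simp [merge_intervals]
  · unfold merge_intervals
    rw [if_neg hnil]
    have hperm := PySem.List.sorted_perm Cl (fun x => x.1) false
    have hpw := PySem.List.sorted_pairwise Cl (fun x => x.1)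
    obtain ⟨h, t, hS⟩ : ∃ h t, PySem.List.sorted Cl (fun x => x.1) false = h :: t := by
      cases hE : PySem.List.sorted Cl (fun x => x.1) false with
      | nil => exact absurd ((PySem.List.sorted_eq_nil_iff _ _ _).mp hE) hnil
      | cons a b => exact ⟨a, b, rfl⟩
    rw [hS]
    rw [hS] at hperm hpw
    simp only [List.drop_succ_cons, List.drop_zero, List.headD_cons]
    have hfold := foldA t [] h
    rw [List.nil_append] at hfold
    rw [hfold, List.nil_append, List.map_id']
    have hall : ∀ p ∈ h :: t, p.1 < p.2 := fun p hp => hCl p (hperm.subset hp)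
    have hh : h.1 < h.2 := hall h (by simp)
    have hget := List.pairwise_cons.mp hpw
    obtain ⟨_, hcanA, hcovA⟩ := goA_props t h hh (fun p hp => hall p (by simp [hp]))
      hget.2 hget.1
    obtain ⟨hcanB, hcovB⟩ := foldB Cl [] hCl ⟨by simp, by simp⟩
    refine canonEq _ _ hcanA hcanB ?_
    intro x
    rw [hcovA x, hcovB x]
    have hCl' : covered Cl x ↔ covered (h :: t) x := (covered_perm hperm x).symm
    rw [hCl', covered_cons]
    simp [covered]

-- B's loop is the fold of insertIv over the cropped pair list
theorem altGo_eq (ls le : Int) (l : List Int) : ∀ (m : List (Int × Int)),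
    altGo ls le l m =
      (((pairUp l).filter (fun se => decide (max se.1 ls < min se.2 le))).map
          (fun se => (max se.1 ls, min se.2 le))).foldl (fun m q => insertIv q.1 q.2 m) m := by
  induction l using evens.induct with
  | case1 x y r ih =>
    intro m
    simp only [altGo, pairUp, List.filter_cons]
    by_cases h : max x ls < min y le
    · simp only [if_pos h, decide_eq_true_eq]
      simp only [List.map_cons, List.foldl_cons]
      exact ih _
    · simp only [if_neg h]
      have hd : decide (max (x, y).1 ls < min (x, y).2 le) = false := by
        simpa using h
      rw [hd]
      simp only [Bool.false_eq_true, if_false]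
      exact ih _
  | case2 x => intro m; simp [altGo, pairUp]
  | case3 => intro m; simp [altGo, pairUp]

-- ===== VERDICT (by name: the statement is the Claim_ definition above) =====
theorem crop_and_merge_spec : Claim_equal_crop_and_merge := by
  unfold Claim_equal_crop_and_merge
  intro l ls le _
  unfold Spec_crop_and_merge crop_and_merge crop_and_merge_alt
  simp only [slice2_evens, slice2_odds, zip_evens_odds]
  have hcrop := PySem.List.foldl_append_if
    (fun (se : Int × Int) => decide (max se.1 ls < min se.2 le))
    (fun (se : Int × Int) => (max se.1 ls, min se.2 le)) (pairUp l) []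
  rw [List.nil_append] at hcrop
  simp only [decide_eq_true_eq] at hcrop
  rw [hcrop]
  have hCl : ∀ p ∈ ((pairUp l).filter
      (fun se => decide (max se.1 ls < min se.2 le))).map
      (fun se => (max se.1 ls, min se.2 le)), p.1 < p.2 := by
    intro p hp
    rcases List.mem_map.mp hp with ⟨se, hse, rfl⟩
    have := (List.mem_filter.mp hse).2
    simpa using this
  rw [merge_eq_fold _ hCl, altGo_eq]
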